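-- pv_equiv track=rewrite | github.com/zhouyida0724/diffusion-planner-project | scripts/eval/fast_eval_maneuver_ckpts.py | _group_from_tags
-- ===== SOURCE A (Python) =====
-- from typing import Any
--
-- _LEFT_TAG = "starting_left_turn"
--
-- _RIGHT_TAG = "starting_right_turn"
--
-- _STRAIGHT_TAGS = {
--     "starting_straight_traffic_light_intersection_traversal",
--     "starting_straight_stop_sign_intersection_traversal",
-- }
--
-- def _group_from_tags(tags: list[str] | Any) -> str | None:
--     if not isinstance(tags, list):
--         return None
--     # priority: left > right > straight
--     for t in tags:
--         if not isinstance(t, str):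
--             continue
--         if _LEFT_TAG in t:
--             return "left"
--     for t in tags:
--         if not isinstance(t, str):
--             continue
--         if _RIGHT_TAG in t:
--             return "right"
--     for t in tags:
--         if not isinstance(t, str):
--             continue
--         if any(st in t for st in _STRAIGHT_TAGS):
--             return "straight"
--     return None
-- ===== SOURCE B (Python) =====
-- from typing import Any
--
-- _LEFT_TAG = "starting_left_turn"
--
-- _RIGHT_TAG = "starting_right_turn"
--
-- _STRAIGHT_TAGS = {
--     "starting_straight_traffic_light_intersection_traversal",
--     "starting_straight_stop_sign_intersection_traversal",
-- }
--
-- def _group_from_tags(tags: list[str] | Any) -> str | None: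
--     if not isinstance(tags, list):
--         return None
--     saw_right = False
--     saw_straight = False
--     for t in tags:
--         if not isinstance(t, str):
--             continue
--         if _LEFT_TAG in t:
--             return "left"
--         if _RIGHT_TAG in t:
--             saw_right = True
--         if any(st in t for st in _STRAIGHT_TAGS):
--             saw_straight = True
--     if saw_right:
--         return "right"
--     if saw_straight:
--         return "straight"
--     return None
-- ===== Notes on version B (the rewrite author's own statement) =====
-- stated objective: simpler
-- what changed: Replaced A's three successive scans of the tag list (one per maneuver class) by a single pass that returns 'left' immediately and records right/straight flags, resolved by priority after the loop.
import Mathlib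
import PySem

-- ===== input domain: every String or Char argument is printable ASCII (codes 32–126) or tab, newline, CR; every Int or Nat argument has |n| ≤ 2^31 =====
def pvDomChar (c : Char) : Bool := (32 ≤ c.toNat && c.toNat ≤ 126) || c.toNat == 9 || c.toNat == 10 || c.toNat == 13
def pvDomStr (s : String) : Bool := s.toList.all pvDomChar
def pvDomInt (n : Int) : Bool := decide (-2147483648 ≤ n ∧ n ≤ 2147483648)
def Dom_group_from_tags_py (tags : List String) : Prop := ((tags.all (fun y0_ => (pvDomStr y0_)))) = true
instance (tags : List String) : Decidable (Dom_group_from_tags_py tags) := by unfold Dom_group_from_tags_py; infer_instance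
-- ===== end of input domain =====

-- B replaces A's three successive scans by one pass with right/straight flags (objective: simpler).
-- Under the List String type, Python's isinstance checks are always true and are dropped.

-- ===== PORT A =====
-- A's first scan: return "left" on the first tag containing _LEFT_TAG
def pvScanLeft : List String → Option String
  | [] => none
  | t :: r => if PySem.Str.isIn "starting_left_turn" t then some "left" else pvScanLeft r

-- A's second scan
def pvScanRight : List String → Option String
  | [] => none
  | t :: r => if PySem.Str.isIn "starting_right_turn" t then some "right" else pvScanRight r

-- A's third scan; 'any(st in t for st in _STRAIGHT_TAGS)' over the two-element set
def pvScanStraight : List String → Option String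
  | [] => none
  | t :: r =>
    if PySem.Str.isIn "starting_straight_traffic_light_intersection_traversal" t
       || PySem.Str.isIn "starting_straight_stop_sign_intersection_traversal" t
    then some "straight" else pvScanStraight r

def group_from_tags_py (tags : List String) : Option String :=
  match pvScanLeft tags with
  | some v => some v
  | none =>
    match pvScanRight tags with
    | some v => some v
    | none => pvScanStraight tags

-- ===== PORT B =====
def pvLoopB : List String → Bool → Bool → Option String
  | [], sawRight, sawStraight =>
    if sawRight then some "right" else if sawStraight then some "straight" else none
  | t :: r, sawRight, sawStraight =>
    if PySem.Str.isIn "starting_left_turn" t then some "left"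
    else
      pvLoopB r (sawRight || PySem.Str.isIn "starting_right_turn" t)
        (sawStraight
          || (PySem.Str.isIn "starting_straight_traffic_light_intersection_traversal" t
              || PySem.Str.isIn "starting_straight_stop_sign_intersection_traversal" t))

def group_from_tags_py_alt (tags : List String) : Option String :=
  pvLoopB tags false false

-- ===== PRECONDITION & SPEC =====
def Spec_group_from_tags_py (tags : List String) (out : Option String) : Prop := out = group_from_tags_py_alt tags
instance (tags : List String) (out : Option String) : Decidable (Spec_group_from_tags_py tags out) := by unfold Spec_group_from_tags_py; infer_instance

-- ===== CLAIM (what is proved, stated in full; the proofs are below) =====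
def Claim_equal_group_from_tags_py : Prop := ∀ (tags : List String), Dom_group_from_tags_py tags → Spec_group_from_tags_py tags (group_from_tags_py tags)

-- ===== LEMMAS AND PROOFS =====

def pvHasL (t : String) : Bool := PySem.Str.isIn "starting_left_turn" t
def pvHasR (t : String) : Bool := PySem.Str.isIn "starting_right_turn" t
def pvHasS (t : String) : Bool :=
  PySem.Str.isIn "starting_straight_traffic_light_intersection_traversal" t
    || PySem.Str.isIn "starting_straight_stop_sign_intersection_traversal" t

lemma pvScanLeft_eq (tags : List String) :
    pvScanLeft tags = if tags.any pvHasL then some "left" else none := by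
  induction tags with
  | nil => simp [pvScanLeft]
  | cons t r ih =>
    simp only [pvScanLeft, List.any_cons, ih, pvHasL]
    by_cases h : PySem.Str.isIn "starting_left_turn" t <;> simp at h <;> simp [h]

lemma pvScanRight_eq (tags : List String) :
    pvScanRight tags = if tags.any pvHasR then some "right" else none := by
  induction tags with
  | nil => simp [pvScanRight]
  | cons t r ih =>
    simp only [pvScanRight, List.any_cons, ih, pvHasR]
    by_cases h : PySem.Str.isIn "starting_right_turn" t <;> simp at h <;> simp [h]

lemma pvScanStraight_eq (tags : List String) :
    pvScanStraight tags = if tags.any pvHasS then some "straight" else none := by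
  induction tags with
  | nil => simp [pvScanStraight]
  | cons t r ih =>
    simp only [pvScanStraight, List.any_cons, ih, pvHasS]
    by_cases h : pvHasS t <;> simp [pvHasS] at h <;> simp [h, or_assoc]

lemma pvLoopB_eq (tags : List String) : ∀ (sawR sawS : Bool),
    pvLoopB tags sawR sawS =
      if tags.any pvHasL then some "left"
      else if sawR || tags.any pvHasR then some "right"
      else if sawS || tags.any pvHasS then some "straight"
      else none := by
  induction tags with
  | nil => intro sawR sawS; simp [pvLoopB]
  | cons t r ih =>
    intro sawR sawS
    simp only [pvLoopB, List.any_cons, ih, pvHasL, pvHasR, pvHasS]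
    by_cases hl : PySem.Str.isIn "starting_left_turn" t
    · simp at hl; simp [hl]
    · simp at hl; simp [hl, or_assoc]

-- ===== VERDICT (by name: the statement is the Claim_ definition above) =====
theorem group_from_tags_py_spec : Claim_equal_group_from_tags_py := by
  intro tags _
  unfold Spec_group_from_tags_py group_from_tags_py group_from_tags_py_alt
  rw [pvScanLeft_eq, pvScanRight_eq, pvScanStraight_eq, pvLoopB_eq]
  by_cases hl : tags.any pvHasL <;> by_cases hr : tags.any pvHasR <;> simp [hl, hr]
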